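-- pv_equiv track=rewrite | github.com/vladamisici/BetterBBox | api_server.py | _get_class_category
-- ===== SOURCE A (Python) =====
-- def _get_class_category(class_name: str) -> str:
--     """Get category for a class"""
--     categories = {
--         'document': ['text', 'title', 'list', 'table', 'figure', 'caption',
--                     'header', 'footer', 'page_number'],
--         'music': ['staff', 'measure', 'note', 'clef', 'time_signature', 'lyrics'],
--         'form': ['checkbox', 'input_field', 'signature_field', 'dropdown'],
--         'diagram': ['flowchart', 'graph', 'equation'],
--         'special': ['barcode', 'qr_code', 'logo', 'stamp']
--     }
--
--     for category, items in categories.items():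
--         if class_name in items:
--             return category
--     return 'other'
-- ===== SOURCE B (Python) =====
-- # Binary search over a sorted (class_name, category) table instead of A's
-- # linear scan over per-category lists.
-- _SORTED = [
--     ('barcode', 'special'), ('caption', 'document'), ('checkbox', 'form'),
--     ('clef', 'music'), ('dropdown', 'form'), ('equation', 'diagram'),
--     ('figure', 'document'), ('flowchart', 'diagram'), ('footer', 'document'),
--     ('graph', 'diagram'), ('header', 'document'), ('input_field', 'form'),
--     ('list', 'document'), ('logo', 'special'), ('lyrics', 'music'),
--     ('measure', 'music'), ('note', 'music'), ('page_number', 'document'),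
--     ('qr_code', 'special'), ('signature_field', 'form'), ('staff', 'music'),
--     ('stamp', 'special'), ('table', 'document'), ('text', 'document'),
--     ('time_signature', 'music'), ('title', 'document'),
-- ]
--
--
-- def _get_class_category(class_name: str) -> str:
--     """Get category for a class"""
--     lo, hi = 0, len(_SORTED)
--     while lo < hi:
--         mid = (lo + hi) // 2
--         key, cat = _SORTED[mid]
--         if key == class_name:
--             return cat
--         if key < class_name:
--             lo = mid + 1
--         else:
--             hi = mid
--     return 'other'
-- ===== Notes on version B (the rewrite author's own statement) =====
-- stated objective: alternative
-- what changed: Replaces A's linear scan over per-category membership lists with a hand-written binary search over one lexicographically sorted (class_name, category) table; correct because the fixed 26 class names are distinct, so sorted-order bisection finds exactly the same unique match, with the same default for unknown names.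
import Mathlib
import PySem

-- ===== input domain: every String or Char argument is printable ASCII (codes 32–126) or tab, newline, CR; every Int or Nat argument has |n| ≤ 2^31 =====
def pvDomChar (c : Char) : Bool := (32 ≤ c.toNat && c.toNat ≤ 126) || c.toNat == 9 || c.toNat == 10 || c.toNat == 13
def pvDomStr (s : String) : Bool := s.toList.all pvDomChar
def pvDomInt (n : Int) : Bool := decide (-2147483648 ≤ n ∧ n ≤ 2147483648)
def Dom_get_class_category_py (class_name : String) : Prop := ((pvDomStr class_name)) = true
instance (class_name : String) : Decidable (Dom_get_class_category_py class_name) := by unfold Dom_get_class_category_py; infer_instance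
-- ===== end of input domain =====

-- B replaces A's linear scan over per-category lists by a binary search on one sorted (class, category) table; same return values.


-- ===== PORT A =====
def pvCategories : List (String × List String) :=
  [("document", ["text", "title", "list", "table", "figure", "caption",
                 "header", "footer", "page_number"]),
   ("music", ["staff", "measure", "note", "clef", "time_signature", "lyrics"]),
   ("form", ["checkbox", "input_field", "signature_field", "dropdown"]),
   ("diagram", ["flowchart", "graph", "equation"]),
   ("special", ["barcode", "qr_code", "logo", "stamp"])]

-- the 'for category, items in categories.items(): if class_name in items: return category' loop
def pvScanCats (class_name : String) : List (String × List String) → String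
  | [] => "other"
  | (cat, items) :: rest => if items.contains class_name then cat else pvScanCats class_name rest

def get_class_category_py (class_name : String) : String :=
  pvScanCats class_name pvCategories

-- ===== PORT B =====
-- _SORTED: the 26 (class_name, category) pairs sorted lexicographically by class name
def pvSorted : List (String × String) :=
  [("barcode", "special"), ("caption", "document"), ("checkbox", "form"),
   ("clef", "music"), ("dropdown", "form"), ("equation", "diagram"),
   ("figure", "document"), ("flowchart", "diagram"), ("footer", "document"),
   ("graph", "diagram"), ("header", "document"), ("input_field", "form"),
   ("list", "document"), ("logo", "special"), ("lyrics", "music"),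
   ("measure", "music"), ("note", "music"), ("page_number", "document"),
   ("qr_code", "special"), ("signature_field", "form"), ("staff", "music"),
   ("stamp", "special"), ("table", "document"), ("text", "document"),
   ("time_signature", "music"), ("title", "document")]

-- the 'while lo < hi' binary-search loop of Source B; fuel bounds the iteration count
-- (each step shrinks hi - lo, and fuel = table length ≥ any possible iteration count)
def pvBisect (class_name : String) : Nat → Nat → Nat → String
  | 0, _, _ => "other"
  | fuel + 1, lo, hi =>
    if lo < hi then
      let mid := (lo + hi) / 2
      let kc := pvSorted.getD mid ("", "")
      if kc.1 == class_name then kc.2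
      else if PySem.Chars.strLt kc.1.toList class_name.toList then pvBisect class_name fuel (mid + 1) hi
      else pvBisect class_name fuel lo mid
    else "other"

def get_class_category_py_alt (class_name : String) : String :=
  pvBisect class_name pvSorted.length 0 pvSorted.length

-- ===== PRECONDITION & SPEC =====
def Spec_get_class_category_py (class_name : String) (out : String) : Prop := out = get_class_category_py_alt class_name
instance (class_name : String) (out : String) : Decidable (Spec_get_class_category_py class_name out) := by unfold Spec_get_class_category_py; infer_instance

-- ===== CLAIM (what is proved, stated in full; the proofs are below) =====
def Claim_equal_get_class_category_py : Prop := ∀ (class_name : String), Dom_get_class_category_py class_name → Spec_get_class_category_py class_name (get_class_category_py class_name)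

-- ===== LEMMAS AND PROOFS =====
-- If s matches no key of the table, the binary search answers "other".
theorem pvBisect_notMem (s : String) (hkeys : ∀ p ∈ pvSorted, p.1 ≠ s) :
    ∀ (fuel lo hi : Nat), hi ≤ pvSorted.length → pvBisect s fuel lo hi = "other" := by
  intro fuel
  induction fuel with
  | zero => intro lo hi _; rfl
  | succ f ih =>
    intro lo hi hhi
    unfold pvBisect
    by_cases hlt : lo < hi
    · have hmid : (lo + hi) / 2 < pvSorted.length := by omega
      have hget : pvSorted.getD ((lo + hi) / 2) ("", "") = pvSorted[(lo + hi) / 2] :=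
        List.getD_eq_getElem pvSorted ("", "") hmid
      have hne : (pvSorted.getD ((lo + hi) / 2) ("", "")).1 ≠ s := by
        rw [hget]; exact hkeys _ (List.getElem_mem hmid)
      simp only [hlt, if_true, beq_iff_eq, hne, if_false]
      split
      · exact ih _ _ hhi
      · exact ih _ _ (by omega)
    · simp [hlt]

-- ===== VERDICT (by name: the statement is the Claim_ definition above) =====
theorem get_class_category_py_spec : Claim_equal_get_class_category_py := by
  intro s _
  unfold Spec_get_class_category_py
  by_cases h0 : s = "text"
  · subst h0; decide
  by_cases h1 : s = "title"
  · subst h1; decide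
  by_cases h2 : s = "list"
  · subst h2; decide
  by_cases h3 : s = "table"
  · subst h3; decide
  by_cases h4 : s = "figure"
  · subst h4; decide
  by_cases h5 : s = "caption"
  · subst h5; decide
  by_cases h6 : s = "header"
  · subst h6; decide
  by_cases h7 : s = "footer"
  · subst h7; decide
  by_cases h8 : s = "page_number"
  · subst h8; decide
  by_cases h9 : s = "staff"
  · subst h9; decide
  by_cases h10 : s = "measure"
  · subst h10; decide
  by_cases h11 : s = "note"
  · subst h11; decide
  by_cases h12 : s = "clef"
  · subst h12; decide
  by_cases h13 : s = "time_signature"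
  · subst h13; decide
  by_cases h14 : s = "lyrics"
  · subst h14; decide
  by_cases h15 : s = "checkbox"
  · subst h15; decide
  by_cases h16 : s = "input_field"
  · subst h16; decide
  by_cases h17 : s = "signature_field"
  · subst h17; decide
  by_cases h18 : s = "dropdown"
  · subst h18; decide
  by_cases h19 : s = "flowchart"
  · subst h19; decide
  by_cases h20 : s = "graph"
  · subst h20; decide
  by_cases h21 : s = "equation"
  · subst h21; decide
  by_cases h22 : s = "barcode"
  · subst h22; decide
  by_cases h23 : s = "qr_code"
  · subst h23; decide
  by_cases h24 : s = "logo"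
  · subst h24; decide
  by_cases h25 : s = "stamp"
  · subst h25; decide
  have hkeys : ∀ p ∈ pvSorted, p.1 ≠ s := by
    intro p hp
    simp only [pvSorted, List.mem_cons, List.not_mem_nil, or_false] at hp
    rcases hp with rfl|rfl|rfl|rfl|rfl|rfl|rfl|rfl|rfl|rfl|rfl|rfl|rfl|rfl|rfl|rfl|rfl|rfl|rfl|rfl|rfl|rfl|rfl|rfl|rfl|rfl <;>
      simp_all [Ne.symm, eq_comm]
  have hB : get_class_category_py_alt s = "other" := by
    unfold get_class_category_py_alt
    exact pvBisect_notMem s hkeys _ _ _ le_rfl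
  rw [hB]
  unfold get_class_category_py
  simp [pvScanCats, pvCategories, h0, h1, h2, h3, h4, h5, h6, h7, h8, h9, h10, h11, h12,
    h13, h14, h15, h16, h17, h18, h19, h20, h21, h22, h23, h24, h25]
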